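-- pv_equiv track=rewrite | github.com/fenilenvinileno97/interact_os | interact_os/organizer.py | set_dir_matches
-- ===== SOURCE A (Python) =====
-- def set_dir_matches(from_cwd, list_of_extensions):
--     matches = {}
--     for item in from_cwd:
--         ext_not_found = True
--         for key, value in list_of_extensions.items():
--             if item in value:
--                 ext_not_found=False
--                 break
--         if ext_not_found:
--             a, b = (item, 'Miscellaneous')
--             matches[a] = b
--
--     for item in from_cwd:
--         ext_found = True
--         for key, value in list_of_extensions.items():
--             if item in value:
--                 ext_found=False
--                 break
--         if not ext_found:
--             a,b = (item, key)
--             matches[a] = b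
--     return matches
-- ===== SOURCE B (Python) =====
-- def set_dir_matches(from_cwd, list_of_extensions):
--     # Build an inverted index ext -> first category key once, then classify in O(1) per item.
--     lookup = {}
--     for key, values in list_of_extensions.items():
--         for v in values:
--             lookup.setdefault(v, key)
--     matches = {item: 'Miscellaneous' for item in from_cwd if item not in lookup}
--     for item in from_cwd:
--         if item in lookup:
--             matches[item] = lookup[item]
--     return matches
-- ===== Notes on version B (the rewrite author's own statement) =====
-- stated objective: faster
-- what changed: B builds an inverted index ext->first-category dict once (setdefault), then classifies each item with O(1) lookups in one misc comprehension plus one found pass, instead of A's two outer scans each rescanning every extension list per item.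
import Mathlib
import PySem

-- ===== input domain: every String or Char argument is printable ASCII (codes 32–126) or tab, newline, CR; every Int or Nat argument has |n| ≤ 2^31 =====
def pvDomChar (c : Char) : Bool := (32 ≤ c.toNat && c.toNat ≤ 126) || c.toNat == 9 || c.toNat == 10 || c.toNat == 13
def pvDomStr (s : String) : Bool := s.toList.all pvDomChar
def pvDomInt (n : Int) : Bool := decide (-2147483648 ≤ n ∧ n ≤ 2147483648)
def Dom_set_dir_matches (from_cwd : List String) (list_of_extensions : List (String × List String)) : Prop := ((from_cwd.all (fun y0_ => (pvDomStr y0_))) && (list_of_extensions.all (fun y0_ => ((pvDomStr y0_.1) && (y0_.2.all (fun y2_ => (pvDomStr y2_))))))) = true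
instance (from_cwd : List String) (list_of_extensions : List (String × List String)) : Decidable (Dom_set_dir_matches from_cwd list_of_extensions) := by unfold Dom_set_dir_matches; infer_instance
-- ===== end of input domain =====

-- B replaces A's two full rescans of list_of_extensions per item with an inverted index
-- ext -> first category, built once; objective: faster (O(items + total extensions) vs O(items * total extensions)).


-- ===== PORT A =====
-- A's inner 'for key, value in list_of_extensions.items(): if item in value: break' loop:
-- returns the first key whose value list contains item (none = flag stays True).
def pvFindKey (item : String) (exts : List (String × List String)) : Option String :=
  match exts with
  | [] => none
  | (key, value) :: rest => if item ∈ value then some key else pvFindKey item rest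

def set_dir_matches (from_cwd : List String) (list_of_extensions : List (String × List String)) : List (String × String) :=
  -- first loop: insert 'Miscellaneous' for items with no matching key
  let m1 : PySem.Dict String String :=
    from_cwd.foldl (fun m item =>
      match pvFindKey item list_of_extensions with
      | none => m.insert item "Miscellaneous"
      | some _ => m) PySem.Dict.empty
  -- second loop: for found items, insert the leftover 'key' (= the matching key)
  let m2 : PySem.Dict String String :=
    from_cwd.foldl (fun m item =>
      match pvFindKey item list_of_extensions with
      | some k => m.insert item k
      | none => m) m1
  m2.items

-- ===== PORT B =====
def set_dir_matches_alt (from_cwd : List String) (list_of_extensions : List (String × List String)) : List (String × String) :=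
  let lookup : PySem.Dict String String :=
    list_of_extensions.foldl (fun d kv => kv.2.foldl (fun d v => d.setdefault v kv.1) d) PySem.Dict.empty
  let misc : PySem.Dict String String :=
    from_cwd.foldl (fun m item =>
      if lookup.contains item then m else m.insert item "Miscellaneous") PySem.Dict.empty
  let result : PySem.Dict String String :=
    from_cwd.foldl (fun m item =>
      match lookup.get? item with
      | some k => m.insert item k
      | none => m) misc
  result.items

-- ===== PRECONDITION & SPEC =====
def Spec_set_dir_matches (from_cwd : List String) (list_of_extensions : List (String × List String)) (out : List (String × String)) : Prop := out = set_dir_matches_alt from_cwd list_of_extensions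
instance (from_cwd : List String) (list_of_extensions : List (String × List String)) (out : List (String × String)) : Decidable (Spec_set_dir_matches from_cwd list_of_extensions out) := by unfold Spec_set_dir_matches; infer_instance

-- ===== CLAIM (what is proved, stated in full; the proofs are below) =====
def Claim_equal_set_dir_matches : Prop := ∀ (from_cwd : List String) (list_of_extensions : List (String × List String)), Dom_set_dir_matches from_cwd list_of_extensions → Spec_set_dir_matches from_cwd list_of_extensions (set_dir_matches from_cwd list_of_extensions)

-- ===== LEMMAS AND PROOFS =====

-- setdefault lookup, general key
theorem get?_setdefault {κ ν : Type} [BEq κ] [LawfulBEq κ] [DecidableEq κ]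
    (d : PySem.Dict κ ν) (k j : κ) (v : ν) :
    (d.setdefault k v).get? j = if j = k then some ((d.get? k).getD v) else d.get? j := by
  by_cases hc : d.contains k
  · rw [PySem.Dict.setdefault_of_contains _ _ hc]
    rcases ho : d.get? k with _ | w
    · rw [PySem.Dict.contains_eq_isSome_get?, ho] at hc; simp at hc
    · split_ifs with h
      · subst h; simp [ho]
      · rfl
  · rw [PySem.Dict.setdefault_of_not_contains _ _ (by simpa using hc),
        PySem.Dict.get?_insert]
    have ho : d.get? k = none := by
      rw [PySem.Dict.contains_eq_isSome_get?] at hc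
      cases h : d.get? k <;> simp [h] at hc ⊢
    split_ifs with h <;> simp [ho]

-- lookup after folding one value-list with setdefault
theorem get?_fold_setdefault (vals : List String) (key : String)
    (d : PySem.Dict String String) (item : String) :
    (vals.foldl (fun d v => d.setdefault v key) d).get? item
      = (d.get? item).or (if item ∈ vals then some key else none) := by
  induction vals generalizing d with
  | nil => simp
  | cons v vs ih =>
    simp only [List.foldl_cons, ih, get?_setdefault, List.mem_cons]
    by_cases h : item = v
    · subst h
      cases hd : d.get? item <;> simp
    · simp [h]

-- the inverted index agrees with A's first-match scan
theorem lookup_eq_findKey (exts : List (String × List String)) (item : String) :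
    (exts.foldl (fun d kv => kv.2.foldl (fun d v => d.setdefault v kv.1) d)
        PySem.Dict.empty).get? item = pvFindKey item exts := by
  suffices h : ∀ d : PySem.Dict String String,
      (exts.foldl (fun d kv => kv.2.foldl (fun d v => d.setdefault v kv.1) d) d).get? item
        = (d.get? item).or (pvFindKey item exts) by
    simpa using h PySem.Dict.empty
  intro d
  induction exts generalizing d with
  | nil => simp [pvFindKey]
  | cons kv rest ih =>
    simp only [List.foldl_cons, ih, get?_fold_setdefault, pvFindKey]
    split_ifs with h
    · cases hd : d.get? item <;> simp
    · simp

-- B's misc pass equals A's first loop, from any start dict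
theorem misc_loop_eq (from_cwd : List String) (exts : List (String × List String))
    (m : PySem.Dict String String) :
    from_cwd.foldl (fun m item =>
        if (exts.foldl (fun d kv => kv.2.foldl (fun d v => d.setdefault v kv.1) d)
              PySem.Dict.empty).contains item then m
        else m.insert item "Miscellaneous") m
      = from_cwd.foldl (fun m item =>
          match pvFindKey item exts with
          | none => m.insert item "Miscellaneous"
          | some _ => m) m := by
  induction from_cwd generalizing m with
  | nil => rfl
  | cons item rest ih =>
    simp only [List.foldl_cons]
    rw [show (if (exts.foldl (fun d kv => kv.2.foldl (fun d v => d.setdefault v kv.1) d)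
              PySem.Dict.empty).contains item then m
        else m.insert item "Miscellaneous")
      = (match pvFindKey item exts with
          | none => m.insert item "Miscellaneous"
          | some _ => m) from ?_, ih]
    rw [PySem.Dict.contains_eq_isSome_get?, lookup_eq_findKey]
    cases pvFindKey item exts <;> simp

-- B's found pass equals A's second loop, from any start dict
theorem found_loop_eq (from_cwd : List String) (exts : List (String × List String))
    (m : PySem.Dict String String) :
    from_cwd.foldl (fun m item =>
        match (exts.foldl (fun d kv => kv.2.foldl (fun d v => d.setdefault v kv.1) d)
              PySem.Dict.empty).get? item with
        | some k => m.insert item k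
        | none => m) m
      = from_cwd.foldl (fun m item =>
          match pvFindKey item exts with
          | some k => m.insert item k
          | none => m) m := by
  induction from_cwd generalizing m with
  | nil => rfl
  | cons item rest ih =>
    simp only [List.foldl_cons, lookup_eq_findKey]

-- ===== VERDICT (by name: the statement is the Claim_ definition above) =====
theorem set_dir_matches_spec : Claim_equal_set_dir_matches := by
  intro from_cwd exts _
  unfold Spec_set_dir_matches set_dir_matches set_dir_matches_alt
  dsimp only
  rw [misc_loop_eq, found_loop_eq]
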